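-- pv_equiv track=rewrite | github.com/bohuiKang/algorithm-study-14 | 4_november/nov_week2/backtraking_1941_princess/jy_1941.py | check_connecting
-- ===== SOURCE A (Python) =====
-- from collections import deque
--
-- dr = [0, 1, 0, -1]
--
-- dc = [1, 0, -1, 0]
--
-- def check_connecting(com):
--     visited = set()
--     q = deque([com[0]])
--     visited.add(com[0])
--
--     while q:
--         r, c = q.popleft()
--
--         for i in range(4):
--             nr = r + dr[i]
--             nc = c + dc[i]
--
--             # 조합의 좌표가 com에 들어있고, 방문하지 않았을 경우
--             if (nr, nc) in com and (nr, nc) not in visited: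
--                 visited.add((nr, nc))
--                 q.append((nr, nc))
--
--     # 방문한 곳의 개수가 7 -> 다 이어져 있을 경우만 출력
--     return len(visited) == 7
-- ===== SOURCE B (Python) =====
-- def check_connecting(com):
--     # Fixpoint saturation: grow the component of com[0] by whole-list sweeps
--     # until no coordinate of com adjacent to the component remains outside it.
--     visited = {com[0]}
--     grew = True
--     while grew:
--         grew = False
--         for (r, c) in com:
--             if (r, c) not in visited and ((r + 1, c) in visited or (r - 1, c) in visited
--                                           or (r, c + 1) in visited or (r, c - 1) in visited):
--                 visited.add((r, c))
--                 grew = True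
--     return len(visited) == 7
-- ===== Notes on version B (the rewrite author's own statement) =====
-- stated objective: alternative
-- what changed: Replaced the queue-based BFS (deque + per-node direction loop) with a queueless fixpoint saturation: repeated whole-list sweeps add any coordinate of com adjacent to the growing component until a sweep adds nothing; Pre_ excludes the empty list, on which A raises IndexError at com[0].
import Mathlib
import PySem

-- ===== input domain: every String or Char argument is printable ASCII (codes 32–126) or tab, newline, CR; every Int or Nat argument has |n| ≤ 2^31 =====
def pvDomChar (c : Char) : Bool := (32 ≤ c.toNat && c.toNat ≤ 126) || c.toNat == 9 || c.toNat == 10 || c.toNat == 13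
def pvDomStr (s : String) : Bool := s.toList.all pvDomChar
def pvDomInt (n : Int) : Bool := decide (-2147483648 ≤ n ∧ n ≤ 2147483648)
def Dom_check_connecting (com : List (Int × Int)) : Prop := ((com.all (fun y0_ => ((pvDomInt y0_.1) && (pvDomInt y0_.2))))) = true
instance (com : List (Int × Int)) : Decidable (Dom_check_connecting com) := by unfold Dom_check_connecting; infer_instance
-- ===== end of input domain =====

-- B replaces A's queue-based BFS with a queueless whole-list fixpoint saturation (alternative
-- algorithm, same cost); both count the distinct coordinates 4-connected to com[0].

-- ===== PORT A =====
def pvDr : List Int := [0, 1, 0, -1]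
def pvDc : List Int := [1, 0, -1, 0]

-- body of A's `for i in range(4)` loop: state = (visited, newly enqueued)
def pvVisit (com : List (Int × Int)) (st : PySem.Set (Int × Int) × List (Int × Int))
    (n : Int × Int) : PySem.Set (Int × Int) × List (Int × Int) :=
  if com.contains n && !(PySem.Set.contains st.1 n) then (PySem.Set.add st.1 n, st.2 ++ [n]) else st

-- A's `while q` loop; fuel = com.length bounds the number of popleft iterations
-- (each pop corresponds to a distinct visited element, and visited ⊆ com)
def pvBfs (com : List (Int × Int)) : Nat → List (Int × Int) → PySem.Set (Int × Int) → PySem.Set (Int × Int)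
  | 0, _, v => v
  | _ + 1, [], v => v
  | fuel + 1, rc :: qs, v =>
    let st := (List.range 4).foldl
      (fun st i => pvVisit com st (rc.1 + pvDr.getD i 0, rc.2 + pvDc.getD i 0)) (v, [])
    pvBfs com fuel (qs ++ st.2) st.1

def check_connecting (com : List (Int × Int)) : Bool :=
  match com with
  | [] => false  -- Python raises IndexError at com[0]; excluded by Pre_
  | c0 :: _ => PySem.Set.len (pvBfs com com.length [c0] (PySem.Set.ofList [c0])) == 7

-- ===== PORT B =====
-- one `for (r, c) in com` sweep of Source B; state = (visited, grew)
def pvSweep (com : List (Int × Int)) (start : PySem.Set (Int × Int) × Bool) :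
    PySem.Set (Int × Int) × Bool :=
  com.foldl (fun st p =>
    if !(PySem.Set.contains st.1 p) &&
       (PySem.Set.contains st.1 (p.1 + 1, p.2) || PySem.Set.contains st.1 (p.1 - 1, p.2) ||
        PySem.Set.contains st.1 (p.1, p.2 + 1) || PySem.Set.contains st.1 (p.1, p.2 - 1))
    then (PySem.Set.add st.1 p, true) else st) start

-- Source B's `while grew` loop; fuel = com.length bounds the number of sweeps
-- (every sweep but the last strictly grows visited, and visited ⊆ com)
def pvSat (com : List (Int × Int)) : Nat → PySem.Set (Int × Int) → PySem.Set (Int × Int)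
  | 0, v => v
  | fuel + 1, v =>
    let st := pvSweep com (v, false)
    if st.2 then pvSat com fuel st.1 else st.1

def check_connecting_alt (com : List (Int × Int)) : Bool :=
  match com with
  | [] => false  -- Source B raises IndexError at com[0]; excluded by Pre_
  | c0 :: _ => PySem.Set.len (pvSat com com.length (PySem.Set.ofList [c0])) == 7

-- ===== PRECONDITION & SPEC =====
-- Pre_ excludes only the empty list, on which both A and B raise IndexError at com[0].
def Pre_check_connecting (com : List (Int × Int)) : Prop := com ≠ []
instance (com : List (Int × Int)) : Decidable (Pre_check_connecting com) := by
  unfold Pre_check_connecting; infer_instance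

def pvWitness_check_connecting : (List (Int × Int)) := ([(0, 0), (0, 1)])

def Spec_check_connecting (com : List (Int × Int)) (out : Bool) : Prop := out = check_connecting_alt com
instance (com : List (Int × Int)) (out : Bool) : Decidable (Spec_check_connecting com out) := by
  unfold Spec_check_connecting; infer_instance

-- ===== CLAIM (what is proved, stated in full; the proofs are below) =====
def Claim_equal_check_connecting : Prop := ∀ (com : List (Int × Int)), Dom_check_connecting com → Pre_check_connecting com → Spec_check_connecting com (check_connecting com)

-- ===== LEMMAS AND PROOFS =====

-- the four 4-neighbours of a point
def pvNbrs (p : Int × Int) : List (Int × Int) :=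
  [(p.1, p.2 + 1), (p.1 + 1, p.2), (p.1, p.2 - 1), (p.1 - 1, p.2)]

-- points of com 4-connected to c0
inductive pvReach (com : List (Int × Int)) (c0 : Int × Int) : (Int × Int) → Prop
  | base : pvReach com c0 c0
  | step {p q : Int × Int} : pvReach com c0 p → q ∈ pvNbrs p → q ∈ com → pvReach com c0 q

theorem pv_mem_nbrs {p q : Int × Int} :
    q ∈ pvNbrs p ↔ (q.1 = p.1 ∧ q.2 = p.2 + 1) ∨ (q.1 = p.1 + 1 ∧ q.2 = p.2) ∨
      (q.1 = p.1 ∧ q.2 = p.2 - 1) ∨ (q.1 = p.1 - 1 ∧ q.2 = p.2) := by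
  rcases p with ⟨a, b⟩; rcases q with ⟨x, y⟩
  simp [pvNbrs, Prod.ext_iff]

theorem pv_nbrs_symm {p q : Int × Int} : q ∈ pvNbrs p ↔ p ∈ pvNbrs q := by
  rw [pv_mem_nbrs, pv_mem_nbrs]; omega

-- a visited set is closed (no step leaves it)
def pvClosed (com : List (Int × Int)) (v : List (Int × Int)) : Prop :=
  ∀ x ∈ v, ∀ y ∈ pvNbrs x, y ∈ com → y ∈ v

theorem pv_reach_subset {com : List (Int × Int)} {c0 : Int × Int} {v : List (Int × Int)}
    (hc : c0 ∈ v) (hcl : pvClosed com v) : ∀ x, pvReach com c0 x → x ∈ v := by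
  intro x hx
  induction hx with
  | base => exact hc
  | step hp hn hcom ih => exact hcl _ ih _ hn hcom

-- ---- A side : the inner direction fold ----

theorem pv_dirfold_eq (com : List (Int × Int)) (rc : Int × Int)
    (st : PySem.Set (Int × Int) × List (Int × Int)) :
    (List.range 4).foldl
      (fun st i => pvVisit com st (rc.1 + pvDr.getD i 0, rc.2 + pvDc.getD i 0)) st
      = (pvNbrs rc).foldl (pvVisit com) st := by
  simp [show List.range 4 = [0, 1, 2, 3] from rfl, pvNbrs, pvDr, pvDc, sub_eq_add_neg]

-- properties of folding pvVisit over a list of candidate points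
theorem pv_not_contains {s : PySem.Set (Int × Int)} {x : Int × Int} :
    PySem.Set.contains s x = false ↔ x ∉ s := by
  rw [← PySem.Set.contains_iff s x]; simp

theorem pvVisit_cases (com : List (Int × Int)) (st : PySem.Set (Int × Int) × List (Int × Int))
    (n : Int × Int) :
    (pvVisit com st n = st ∧ (n ∈ com → ¬ n ∉ st.1)) ∨
      (n ∈ com ∧ n ∉ st.1 ∧ pvVisit com st n = (PySem.Set.add st.1 n, st.2 ++ [n])) := by
  unfold pvVisit
  split_ifs with h
  · right
    simp only [Bool.and_eq_true, Bool.not_eq_true', pv_not_contains,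
      List.contains_iff_mem] at h
    exact ⟨h.1, h.2, rfl⟩
  · left
    refine ⟨rfl, ?_⟩
    simp only [Bool.and_eq_true, Bool.not_eq_true', pv_not_contains,
      List.contains_iff_mem, not_and] at h
    exact h

theorem pv_visitfold_mem (com : List (Int × Int)) (ns : List (Int × Int)) :
    ∀ (st : PySem.Set (Int × Int) × List (Int × Int)) (x : Int × Int),
    x ∈ (ns.foldl (pvVisit com) st).1 ↔ x ∈ st.1 ∨ (x ∈ ns ∧ x ∈ com) := by
  induction ns with
  | nil => simp
  | cons n ns ih =>
    intro st x
    simp only [List.foldl_cons, ih, List.mem_cons]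
    rcases pvVisit_cases com st n with ⟨hc, hni⟩ | ⟨hcom, hn, hc⟩ <;> rw [hc]
    · constructor
      · rintro (hx | ⟨hx, hc2⟩)
        · exact Or.inl hx
        · exact Or.inr ⟨Or.inr hx, hc2⟩
      · rintro (hx | ⟨rfl | hx, hc2⟩)
        · exact Or.inl hx
        · exact Or.inl (not_not.mp (hni hc2))
        · exact Or.inr ⟨hx, hc2⟩
    · simp only [PySem.Set.mem_add]
      constructor
      · rintro ((hx | rfl) | ⟨hx, hc2⟩)
        · exact Or.inl hx
        · exact Or.inr ⟨Or.inl rfl, hcom⟩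
        · exact Or.inr ⟨Or.inr hx, hc2⟩
      · rintro (hx | ⟨rfl | hx, hc2⟩)
        · exact Or.inl (Or.inl hx)
        · exact Or.inl (Or.inr rfl)
        · exact Or.inr ⟨hx, hc2⟩

theorem pv_visitfold_nodup (com : List (Int × Int)) (ns : List (Int × Int)) :
    ∀ (st : PySem.Set (Int × Int) × List (Int × Int)), st.1.Nodup →
    (ns.foldl (pvVisit com) st).1.Nodup := by
  induction ns with
  | nil => intro st h; simpa using h
  | cons n ns ih =>
    intro st h
    simp only [List.foldl_cons]
    rcases pvVisit_cases com st n with ⟨hc, _⟩ | ⟨_, _, hc⟩ <;> rw [hc]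
    · exact ih st h
    · exact ih _ (PySem.Set.nodup_add st.1 n h)

theorem pv_visitfold_len (com : List (Int × Int)) (ns : List (Int × Int)) :
    ∀ (st : PySem.Set (Int × Int) × List (Int × Int)),
    (ns.foldl (pvVisit com) st).1.length + st.2.length
      = st.1.length + (ns.foldl (pvVisit com) st).2.length := by
  induction ns with
  | nil => intro st; rfl
  | cons n ns ih =>
    intro st
    simp only [List.foldl_cons]
    rcases pvVisit_cases com st n with ⟨hc, _⟩ | ⟨_, hn, hc⟩ <;> rw [hc]
    · exact ih st
    · have := ih (PySem.Set.add st.1 n, st.2 ++ [n])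
      have hadd : (PySem.Set.add st.1 n).length = st.1.length + 1 := by
        rw [PySem.Set.add_of_not_mem hn]; simp
      simp only [hadd, List.length_append, List.length_cons, List.length_nil] at this ⊢
      omega

theorem pv_visitfold_accmono (com : List (Int × Int)) (ns : List (Int × Int)) :
    ∀ (st : PySem.Set (Int × Int) × List (Int × Int)),
    ∀ x ∈ st.2, x ∈ (ns.foldl (pvVisit com) st).2 := by
  induction ns with
  | nil => intro st x hx; simpa using hx
  | cons n ns ih =>
    intro st x hx
    simp only [List.foldl_cons]
    rcases pvVisit_cases com st n with ⟨hc, _⟩ | ⟨_, _, hc⟩ <;> rw [hc]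
    · exact ih st x hx
    · exact ih _ x (by simp [hx])

theorem pv_visitfold_acc (com : List (Int × Int)) (ns : List (Int × Int)) :
    ∀ (st : PySem.Set (Int × Int) × List (Int × Int)), (∀ x ∈ st.2, x ∈ st.1) →
    ∀ x ∈ (ns.foldl (pvVisit com) st).2, x ∈ (ns.foldl (pvVisit com) st).1 := by
  induction ns with
  | nil => intro st h x hx; simpa using h x (by simpa using hx)
  | cons n ns ih =>
    intro st h x hx
    simp only [List.foldl_cons] at hx ⊢
    rcases pvVisit_cases com st n with ⟨hc, _⟩ | ⟨_, _, hc⟩ <;> rw [hc] at hx ⊢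
    · exact ih st h x hx
    · refine ih _ ?_ x hx
      intro y hy
      simp only [List.mem_append, List.mem_singleton] at hy
      rcases hy with hy | rfl
      · exact (PySem.Set.mem_add st.1 n y).2 (Or.inl (h y hy))
      · exact (PySem.Set.mem_add st.1 y y).2 (Or.inr rfl)

theorem pv_visitfold_acc_src (com : List (Int × Int)) (ns : List (Int × Int)) :
    ∀ (st : PySem.Set (Int × Int) × List (Int × Int)),
    ∀ x ∈ (ns.foldl (pvVisit com) st).2, x ∈ st.2 ∨ (x ∈ ns ∧ x ∈ com) := by
  induction ns with
  | nil => intro st x hx; exact Or.inl (by simpa using hx)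
  | cons n ns ih =>
    intro st x hx
    simp only [List.foldl_cons] at hx
    rcases pvVisit_cases com st n with ⟨hc, _⟩ | ⟨hcom, _, hc⟩ <;> rw [hc] at hx
    · rcases ih st x hx with h | ⟨h1, h2⟩
      · exact Or.inl h
      · exact Or.inr ⟨List.mem_cons_of_mem _ h1, h2⟩
    · rcases ih _ x hx with h | ⟨h1, h2⟩
      · simp only [List.mem_append, List.mem_singleton] at h
        rcases h with h | rfl
        · exact Or.inl h
        · exact Or.inr ⟨List.mem_cons_self, hcom⟩
      · exact Or.inr ⟨List.mem_cons_of_mem _ h1, h2⟩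

theorem pv_visitfold_new (com : List (Int × Int)) (ns : List (Int × Int)) :
    ∀ (st : PySem.Set (Int × Int) × List (Int × Int)),
    ∀ x ∈ (ns.foldl (pvVisit com) st).1, x ∈ st.1 ∨ x ∈ (ns.foldl (pvVisit com) st).2 := by
  induction ns with
  | nil => intro st x hx; exact Or.inl (by simpa using hx)
  | cons n ns ih =>
    intro st x hx
    simp only [List.foldl_cons] at hx ⊢
    rcases pvVisit_cases com st n with ⟨hc, _⟩ | ⟨_, _, hc⟩ <;> rw [hc] at hx ⊢
    · exact ih st x hx
    · rcases ih _ x hx with h | h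
      · rcases (PySem.Set.mem_add st.1 n x).1 h with h' | rfl
        · exact Or.inl h'
        · exact Or.inr (pv_visitfold_accmono com ns _ x (by simp))
      · exact Or.inr h

-- ---- A side : the BFS loop ----

-- with enough fuel the loop drains the queue and the result is a closed superset of v
theorem pv_bfs_closed (com : List (Int × Int)) :
    ∀ (fuel : Nat) (q v : List (Int × Int)), v.Nodup → (∀ x ∈ q, x ∈ v) →
      (∀ x ∈ v, x ∈ com) → q.length + com.length ≤ fuel + v.length →
      (∀ x ∈ v, x ∉ q → ∀ y ∈ pvNbrs x, y ∈ com → y ∈ v) →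
      (pvBfs com fuel q v).Nodup ∧ (∀ x ∈ v, x ∈ pvBfs com fuel q v) ∧
      pvClosed com (pvBfs com fuel q v) := by
  intro fuel
  induction fuel with
  | zero =>
    intro q v hnd hqv hvc harith hinv
    have hvlen : v.length ≤ com.length := (hnd.subperm hvc).length_le
    have hq : q = [] := by
      cases q with
      | nil => rfl
      | cons a as => simp only [List.length_cons] at harith; omega
    subst hq
    exact ⟨hnd, fun x hx => hx, fun x hx => hinv x hx (by simp)⟩
  | succ fuel ih =>
    intro q v hnd hqv hvc harith hinv
    cases q with
    | nil => exact ⟨hnd, fun x hx => hx, fun x hx => hinv x hx (by simp)⟩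
    | cons rc qs =>
      rw [show pvBfs com (fuel + 1) (rc :: qs) v
            = pvBfs com fuel
                (qs ++ ((pvNbrs rc).foldl (pvVisit com) (v, [])).2)
                ((pvNbrs rc).foldl (pvVisit com) (v, [])).1 by
            simp only [pvBfs, pv_dirfold_eq]]
      set st := (pvNbrs rc).foldl (pvVisit com) ((v : PySem.Set (Int × Int)), ([] : List (Int × Int))) with hst
      have hmem : ∀ x, x ∈ st.1 ↔ x ∈ v ∨ (x ∈ pvNbrs rc ∧ x ∈ com) := fun x =>
        pv_visitfold_mem com (pvNbrs rc) (v, []) x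
      have hnd' : st.1.Nodup := pv_visitfold_nodup com (pvNbrs rc) (v, []) hnd
      have hlen : st.1.length = v.length + st.2.length := by
        have := pv_visitfold_len com (pvNbrs rc) (v, [])
        simpa using this
      have hnewsub : ∀ x ∈ st.2, x ∈ st.1 :=
        pv_visitfold_acc com (pvNbrs rc) (v, []) (by simp)
      have hnewsrc : ∀ x ∈ st.2, x ∈ pvNbrs rc ∧ x ∈ com := by
        intro x hx
        rcases pv_visitfold_acc_src com (pvNbrs rc) (v, []) x hx with h | h
        · simp at h
        · exact h
      have hvsub : ∀ x ∈ v, x ∈ st.1 := fun x hx => (hmem x).2 (Or.inl hx)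
      refine (ih (qs ++ st.2) st.1 hnd' ?_ ?_ ?_ ?_).imp id (fun h => ⟨fun x hx => h.1 x (hvsub x hx), h.2⟩)
      · intro x hx
        rcases List.mem_append.1 hx with h | h
        · exact hvsub x (hqv x (List.mem_cons_of_mem _ h))
        · exact hnewsub x h
      · intro x hx
        rcases (hmem x).1 hx with h | h
        · exact hvc x h
        · exact h.2
      · simp only [List.length_append, List.length_cons] at harith ⊢
        omega
      · intro x hx hxq
        simp only [List.mem_append, not_or] at hxq
        intro y hy hyc
        by_cases hxrc : x = rc
        · subst hxrc
          exact (hmem y).2 (Or.inr ⟨hy, hyc⟩)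
        · rcases pv_visitfold_new com (pvNbrs rc) (v, []) x hx with h | h
          · have hxnotq : x ∉ rc :: qs := by
              simp only [List.mem_cons, not_or]
              exact ⟨hxrc, hxq.1⟩
            exact hvsub y (hinv x (by simpa using h) hxnotq y hy hyc)
          · exact absurd h hxq.2

theorem pv_bfs_sound (com : List (Int × Int)) (c0 : Int × Int) :
    ∀ (fuel : Nat) (q v : List (Int × Int)), (∀ x ∈ v, pvReach com c0 x) →
      (∀ x ∈ q, pvReach com c0 x) →
      ∀ x ∈ pvBfs com fuel q v, pvReach com c0 x := by
  intro fuel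
  induction fuel with
  | zero => intro q v hv _ x hx; exact hv x hx
  | succ fuel ih =>
    intro q v hv hq x hx
    cases q with
    | nil => exact hv x hx
    | cons rc qs =>
      rw [show pvBfs com (fuel + 1) (rc :: qs) v
            = pvBfs com fuel
                (qs ++ ((pvNbrs rc).foldl (pvVisit com) (v, [])).2)
                ((pvNbrs rc).foldl (pvVisit com) (v, [])).1 by
            simp only [pvBfs, pv_dirfold_eq]] at hx
      have hrc : pvReach com c0 rc := hq rc List.mem_cons_self
      have hnew : ∀ y ∈ ((pvNbrs rc).foldl (pvVisit com) ((v : PySem.Set (Int × Int)), ([] : List (Int × Int)))).1,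
          pvReach com c0 y := by
        intro y hy
        rcases (pv_visitfold_mem com (pvNbrs rc) (v, []) y).1 hy with h | ⟨h1, h2⟩
        · exact hv y h
        · exact pvReach.step hrc h1 h2
      refine ih _ _ hnew ?_ x hx
      intro y hy
      rcases List.mem_append.1 hy with h | h
      · exact hq y (List.mem_cons_of_mem _ h)
      · exact hnew y (pv_visitfold_acc com (pvNbrs rc) (v, []) (by simp) y h)

-- ---- B side : one sweep ----

-- the body of Source B's sweep, named for the proofs (definitionally the foldl body of pvSweep)
def pvSweepStep (st : PySem.Set (Int × Int) × Bool) (p : Int × Int) :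
    PySem.Set (Int × Int) × Bool :=
  if !(PySem.Set.contains st.1 p) &&
     (PySem.Set.contains st.1 (p.1 + 1, p.2) || PySem.Set.contains st.1 (p.1 - 1, p.2) ||
      PySem.Set.contains st.1 (p.1, p.2 + 1) || PySem.Set.contains st.1 (p.1, p.2 - 1))
  then (PySem.Set.add st.1 p, true) else st

theorem pvSweep_eq (com : List (Int × Int)) (st : PySem.Set (Int × Int) × Bool) :
    pvSweep com st = com.foldl pvSweepStep st := rfl

theorem pvSweepStep_cases (st : PySem.Set (Int × Int) × Bool) (p : Int × Int) :
    (pvSweepStep st p = st ∧ (p ∈ st.1 ∨ ∀ y ∈ pvNbrs p, y ∉ st.1)) ∨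
      (p ∉ st.1 ∧ (∃ y ∈ pvNbrs p, y ∈ st.1) ∧
        pvSweepStep st p = (PySem.Set.add st.1 p, true)) := by
  unfold pvSweepStep
  split_ifs with h
  · right
    simp only [Bool.and_eq_true, Bool.not_eq_true', Bool.or_eq_true, pv_not_contains,
      PySem.Set.contains_iff] at h
    refine ⟨h.1, ?_, rfl⟩
    rcases h.2 with ((h' | h') | h') | h'
    · refine ⟨(p.1 + 1, p.2), ?_, h'⟩; simp [pvNbrs]
    · refine ⟨(p.1 - 1, p.2), ?_, h'⟩; simp [pvNbrs]
    · refine ⟨(p.1, p.2 + 1), ?_, h'⟩; simp [pvNbrs]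
    · refine ⟨(p.1, p.2 - 1), ?_, h'⟩; simp [pvNbrs]
  · left
    refine ⟨rfl, ?_⟩
    simp only [Bool.and_eq_true, Bool.not_eq_true', Bool.or_eq_true, pv_not_contains,
      PySem.Set.contains_iff, not_and, not_or] at h
    by_cases hp : p ∈ st.1
    · exact Or.inl hp
    · right
      have h4 := h hp
      intro y hy
      rw [pv_mem_nbrs] at hy
      rcases hy with ⟨h1, h2⟩ | ⟨h1, h2⟩ | ⟨h1, h2⟩ | ⟨h1, h2⟩
      · rw [show y = (p.1, p.2 + 1) from Prod.ext h1 h2]; exact h4.1.2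
      · rw [show y = (p.1 + 1, p.2) from Prod.ext h1 h2]; exact h4.1.1.1
      · rw [show y = (p.1, p.2 - 1) from Prod.ext h1 h2]; exact h4.2
      · rw [show y = (p.1 - 1, p.2) from Prod.ext h1 h2]; exact h4.1.1.2

theorem pvSweepFold_snd_mono (l : List (Int × Int)) :
    ∀ (st : PySem.Set (Int × Int) × Bool), st.2 = true →
    (l.foldl pvSweepStep st).2 = true := by
  induction l with
  | nil => intro st h; simpa using h
  | cons p l ih =>
    intro st h
    simp only [List.foldl_cons]
    rcases pvSweepStep_cases st p with ⟨hc, _⟩ | ⟨_, _, hc⟩ <;> rw [hc]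
    · exact ih st h
    · exact ih _ rfl

theorem pvSweepFold_mono (l : List (Int × Int)) :
    ∀ (st : PySem.Set (Int × Int) × Bool), ∀ x ∈ st.1, x ∈ (l.foldl pvSweepStep st).1 := by
  induction l with
  | nil => intro st x hx; simpa using hx
  | cons p l ih =>
    intro st x hx
    simp only [List.foldl_cons]
    rcases pvSweepStep_cases st p with ⟨hc, _⟩ | ⟨_, _, hc⟩ <;> rw [hc]
    · exact ih st x hx
    · exact ih _ x ((PySem.Set.mem_add st.1 p x).2 (Or.inl hx))

theorem pvSweepFold_nodup (l : List (Int × Int)) :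
    ∀ (st : PySem.Set (Int × Int) × Bool), st.1.Nodup → (l.foldl pvSweepStep st).1.Nodup := by
  induction l with
  | nil => intro st h; simpa using h
  | cons p l ih =>
    intro st h
    simp only [List.foldl_cons]
    rcases pvSweepStep_cases st p with ⟨hc, _⟩ | ⟨_, _, hc⟩ <;> rw [hc]
    · exact ih st h
    · exact ih _ (PySem.Set.nodup_add st.1 p h)

theorem pvSweepFold_src (l : List (Int × Int)) :
    ∀ (st : PySem.Set (Int × Int) × Bool), ∀ x ∈ (l.foldl pvSweepStep st).1,
      x ∈ st.1 ∨ x ∈ l := by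
  induction l with
  | nil => intro st x hx; exact Or.inl (by simpa using hx)
  | cons p l ih =>
    intro st x hx
    simp only [List.foldl_cons] at hx
    rcases pvSweepStep_cases st p with ⟨hc, _⟩ | ⟨_, _, hc⟩ <;> rw [hc] at hx
    · rcases ih st x hx with h | h
      · exact Or.inl h
      · exact Or.inr (List.mem_cons_of_mem _ h)
    · rcases ih _ x hx with h | h
      · rcases (PySem.Set.mem_add st.1 p x).1 h with h' | rfl
        · exact Or.inl h'
        · exact Or.inr List.mem_cons_self
      · exact Or.inr (List.mem_cons_of_mem _ h)

theorem pvSweepFold_len_mono (l : List (Int × Int)) :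
    ∀ (st : PySem.Set (Int × Int) × Bool), st.1.length ≤ (l.foldl pvSweepStep st).1.length := by
  induction l with
  | nil => intro st; simp
  | cons p l ih =>
    intro st
    simp only [List.foldl_cons]
    rcases pvSweepStep_cases st p with ⟨hc, _⟩ | ⟨hp, _, hc⟩ <;> rw [hc]
    · exact ih st
    · refine le_trans ?_ (ih (PySem.Set.add st.1 p, true))
      rw [PySem.Set.add_of_not_mem hp]; simp

theorem pvSweepFold_stable (l : List (Int × Int)) :
    ∀ (st : PySem.Set (Int × Int) × Bool), (l.foldl pvSweepStep st).2 = false →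
      l.foldl pvSweepStep st = st := by
  induction l with
  | nil => intro st _; rfl
  | cons p l ih =>
    intro st hf
    simp only [List.foldl_cons] at hf ⊢
    rcases pvSweepStep_cases st p with ⟨hc, _⟩ | ⟨_, _, hc⟩ <;> rw [hc] at hf ⊢
    · exact ih st hf
    · exact absurd (pvSweepFold_snd_mono l (PySem.Set.add st.1 p, true) rfl) (by simp [hf])

theorem pvSweepFold_grow (l : List (Int × Int)) :
    ∀ (st : PySem.Set (Int × Int) × Bool), st.2 = false →
      (l.foldl pvSweepStep st).2 = true →
      st.1.length + 1 ≤ (l.foldl pvSweepStep st).1.length := by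
  induction l with
  | nil => intro st h1 h2; rw [List.foldl_nil] at h2; rw [h1] at h2; cases h2
  | cons p l ih =>
    intro st h1 h2
    simp only [List.foldl_cons] at h2 ⊢
    rcases pvSweepStep_cases st p with ⟨hc, _⟩ | ⟨hp, _, hc⟩ <;> rw [hc] at h2 ⊢
    · exact ih st h1 h2
    · have hlen1 : (PySem.Set.add st.1 p).length = st.1.length + 1 := by
        rw [PySem.Set.add_of_not_mem hp]; simp
      have hlen2 : (PySem.Set.add st.1 p).length
          ≤ (List.foldl pvSweepStep (PySem.Set.add st.1 p, true) l).1.length :=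
        pvSweepFold_len_mono l (PySem.Set.add st.1 p, true)
      omega

theorem pvSweepFold_fix (l : List (Int × Int)) :
    ∀ (v : PySem.Set (Int × Int)), (l.foldl pvSweepStep (v, false)).2 = false →
      ∀ p ∈ l, p ∈ v ∨ ∀ y ∈ pvNbrs p, y ∉ v := by
  induction l with
  | nil => intro v _ p hp; cases hp
  | cons n l ih =>
    intro v hf p hp
    simp only [List.foldl_cons] at hf
    rcases pvSweepStep_cases ((v : PySem.Set (Int × Int)), false) n with ⟨hc, hcond⟩ | ⟨_, _, hc⟩
    · rw [hc] at hf
      rcases List.mem_cons.mp hp with rfl | hp'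
      · exact hcond
      · exact ih v hf p hp' 
    · rw [hc] at hf
      exact absurd (pvSweepFold_snd_mono l (PySem.Set.add v n, true) rfl) (by simp [hf])

-- a sweep that reports no growth changed nothing, and the state is then a fixpoint
theorem pv_sweep_closed (com : List (Int × Int)) (v : List (Int × Int))
    (h : (pvSweep com (v, false)).2 = false) : pvClosed com v := by
  rw [pvSweep_eq] at h
  intro x hx y hy hyc
  rcases pvSweepFold_fix com v h y hyc with h' | h'
  · exact h'
  · exact absurd hx (h' x (pv_nbrs_symm.1 hy))

theorem pv_sweep_sound (com : List (Int × Int)) (c0 : Int × Int) :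
    ∀ (l : List (Int × Int)), (∀ p ∈ l, p ∈ com) →
    ∀ (st : PySem.Set (Int × Int) × Bool), (∀ x ∈ st.1, pvReach com c0 x) →
    ∀ x ∈ (l.foldl pvSweepStep st).1, pvReach com c0 x := by
  intro l
  induction l with
  | nil => intro _ st hv x hx; exact hv x (by simpa using hx)
  | cons p l ih =>
    intro hl st hv x hx
    simp only [List.foldl_cons] at hx
    rcases pvSweepStep_cases st p with ⟨hc, _⟩ | ⟨_, ⟨y, hy, hyv⟩, hc⟩ <;> rw [hc] at hx
    · exact ih (fun q hq => hl q (List.mem_cons_of_mem _ hq)) st hv x hx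
    · refine ih (fun q hq => hl q (List.mem_cons_of_mem _ hq)) _ ?_ x hx
      intro z hz
      rcases (PySem.Set.mem_add st.1 p z).1 hz with h' | rfl
      · exact hv z h'
      · exact pvReach.step (hv y hyv) (pv_nbrs_symm.1 hy) (hl z List.mem_cons_self)

-- ---- B side : the saturation loop ----

theorem pvSat_succ (com : List (Int × Int)) (fuel : Nat) (v : PySem.Set (Int × Int)) :
    pvSat com (fuel + 1) v
      = if (pvSweep com (v, false)).2 then pvSat com fuel (pvSweep com (v, false)).1
        else (pvSweep com (v, false)).1 := rfl

theorem pv_sat_closed (com : List (Int × Int)) :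
    ∀ (fuel : Nat) (v : List (Int × Int)), v.Nodup → (∀ x ∈ v, x ∈ com) →
      com.length + 1 ≤ fuel + v.length →
      (pvSat com fuel v).Nodup ∧ (∀ x ∈ v, x ∈ pvSat com fuel v) ∧
      pvClosed com (pvSat com fuel v) := by
  intro fuel
  induction fuel with
  | zero =>
    intro v hnd hvc harith
    have : v.length ≤ com.length := (hnd.subperm hvc).length_le
    omega
  | succ fuel ih =>
    intro v hnd hvc harith
    rw [pvSat_succ]
    by_cases hg : (pvSweep com (v, false)).2 = true
    · rw [if_pos hg]
      have hgrow : v.length + 1 ≤ (pvSweep com (v, false)).1.length := by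
        rw [pvSweep_eq] at hg ⊢
        exact pvSweepFold_grow com (v, false) rfl hg
      have hnd' : (pvSweep com (v, false)).1.Nodup := by
        rw [pvSweep_eq]; exact pvSweepFold_nodup com (v, false) hnd
      have hsub : ∀ x ∈ (pvSweep com (v, false)).1, x ∈ com := by
        rw [pvSweep_eq]
        intro x hx
        rcases pvSweepFold_src com (v, false) x hx with h | h
        · exact hvc x h
        · exact h
      obtain ⟨h1, h2, h3⟩ := ih (pvSweep com (v, false)).1 hnd' hsub (by omega)
      refine ⟨h1, fun x hx => h2 x ?_, h3⟩
      rw [pvSweep_eq]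
      exact pvSweepFold_mono com (v, false) x hx
    · rw [if_neg hg]
      rw [Bool.not_eq_true] at hg
      have hst : (pvSweep com (v, false)).1 = v := by
        rw [pvSweep_eq]
        rw [pvSweep_eq] at hg
        rw [pvSweepFold_stable com (v, false) hg]
      rw [hst]
      exact ⟨hnd, fun x hx => hx, pv_sweep_closed com v hg⟩

theorem pv_sat_sound (com : List (Int × Int)) (c0 : Int × Int) :
    ∀ (fuel : Nat) (v : List (Int × Int)), (∀ x ∈ v, pvReach com c0 x) →
      ∀ x ∈ pvSat com fuel v, pvReach com c0 x := by
  intro fuel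
  induction fuel with
  | zero => intro v hv x hx; exact hv x hx
  | succ fuel ih =>
    intro v hv x hx
    rw [pvSat_succ] at hx
    have hs : ∀ y ∈ (pvSweep com (v, false)).1, pvReach com c0 y := by
      rw [pvSweep_eq]
      exact pv_sweep_sound com c0 com (fun p hp => hp) (v, false) hv
    by_cases hg : (pvSweep com (v, false)).2 = true
    · rw [if_pos hg] at hx
      exact ih _ hs x hx
    · rw [if_neg hg] at hx
      exact hs x hx

-- ===== VERDICT (by name: the statement is the Claim_ definition above) =====
theorem check_connecting_spec : Claim_equal_check_connecting := by
  intro com _ hpre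
  unfold Spec_check_connecting
  cases com with
  | nil => exact absurd rfl hpre
  | cons c0 rest =>
    have hc0 : c0 ∈ c0 :: rest := List.mem_cons_self
    have hof : PySem.Set.ofList [c0] = [c0] := rfl
    -- A's BFS result
    obtain ⟨hAnd, hAsub, hAcl⟩ :=
      pv_bfs_closed (c0 :: rest) (c0 :: rest).length [c0] [c0]
        (by simp) (by simp) (by simp) (by omega)
        (by intro x hx hnx; exact absurd hx hnx)
    have hAc0 : c0 ∈ pvBfs (c0 :: rest) (c0 :: rest).length [c0] [c0] :=
      hAsub c0 (by simp)
    have hAmem : ∀ x, x ∈ pvBfs (c0 :: rest) (c0 :: rest).length [c0] [c0]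
        ↔ pvReach (c0 :: rest) c0 x := by
      intro x
      constructor
      · exact pv_bfs_sound (c0 :: rest) c0 (c0 :: rest).length [c0] [c0]
          (by intro y hy; rw [List.mem_singleton] at hy; subst hy; exact pvReach.base)
          (by intro y hy; rw [List.mem_singleton] at hy; subst hy; exact pvReach.base) x
      · exact fun h => pv_reach_subset hAc0 hAcl x h
    -- B's saturation result
    obtain ⟨hBnd, hBsub, hBcl⟩ :=
      pv_sat_closed (c0 :: rest) (c0 :: rest).length [c0]
        (by simp) (by simp) (by simp)
    have hBc0 : c0 ∈ pvSat (c0 :: rest) (c0 :: rest).length [c0] :=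
      hBsub c0 (by simp)
    have hBmem : ∀ x, x ∈ pvSat (c0 :: rest) (c0 :: rest).length [c0]
        ↔ pvReach (c0 :: rest) c0 x := by
      intro x
      constructor
      · exact pv_sat_sound (c0 :: rest) c0 (c0 :: rest).length [c0]
          (by intro y hy; rw [List.mem_singleton] at hy; subst hy; exact pvReach.base) x
      · exact fun h => pv_reach_subset hBc0 hBcl x h
    have hperm : (pvBfs (c0 :: rest) (c0 :: rest).length [c0] [c0]).Perm
        (pvSat (c0 :: rest) (c0 :: rest).length [c0]) :=
      (List.perm_ext_iff_of_nodup hAnd hBnd).2 (fun a => by rw [hAmem, hBmem])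
    have hlen : PySem.Set.len (pvBfs (c0 :: rest) (c0 :: rest).length [c0] [c0])
        = PySem.Set.len (pvSat (c0 :: rest) (c0 :: rest).length [c0]) := by
      simp only [PySem.Set.len, hperm.length_eq]
    show (PySem.Set.len (pvBfs (c0 :: rest) (c0 :: rest).length [c0] (PySem.Set.ofList [c0])) == 7)
        = (PySem.Set.len (pvSat (c0 :: rest) (c0 :: rest).length (PySem.Set.ofList [c0])) == 7)
    rw [hof, hlen]
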